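-- pv_equiv track=rewrite | github.com/ADBravo/Estructura-de-Datos-II | desarrollo/sesion19/50 ejercicios.py | generar_numeros_binarios
-- ===== SOURCE A (Python) =====
-- def generar_numeros_binarios(n):
--     if n <= 0:
--         return []
--     resultado = []
--     cola = ["1"]
--     for _ in range(n):
--         actual = cola.pop(0)
--         resultado.append(actual)
--         cola.append(actual + "0")
--         cola.append(actual + "1")
--     return resultado
-- ===== SOURCE B (Python) =====
-- def generar_numeros_binarios(n):
--     return [bin(i)[2:] for i in range(1, n + 1)]
-- ===== Notes on version B (the rewrite author's own statement) =====
-- stated objective: faster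
-- what changed: Replaces the BFS-style string queue with list.pop(0) by a direct closed form: the k-th output is just the binary representation of k, so B maps bin(i)[2:] over range(1, n+1).
import Mathlib
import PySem

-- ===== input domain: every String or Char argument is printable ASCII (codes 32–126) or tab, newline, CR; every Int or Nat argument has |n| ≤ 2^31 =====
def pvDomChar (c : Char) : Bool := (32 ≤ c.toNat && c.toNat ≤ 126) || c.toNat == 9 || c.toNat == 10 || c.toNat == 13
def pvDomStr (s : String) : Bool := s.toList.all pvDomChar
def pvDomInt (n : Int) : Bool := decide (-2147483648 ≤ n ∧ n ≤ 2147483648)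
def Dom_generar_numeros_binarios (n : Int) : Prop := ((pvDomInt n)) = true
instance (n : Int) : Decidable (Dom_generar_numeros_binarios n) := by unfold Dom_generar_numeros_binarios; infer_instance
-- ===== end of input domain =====

-- B replaces A's O(n^2) string queue (list.pop(0) BFS) by the closed form: the k-th output
-- is the binary representation of k, mapped over range(1, n+1); objective: faster.


-- ===== PORT A =====
-- one iteration of A's loop body: pop the queue's front, append it to the result,
-- push front+"0" and front+"1" (empty-queue branch is unreachable: the queue only grows)
def genBinStepA (st : List String × List String) : List String × List String :=
  match st with
  | (res, []) => (res, [])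
  | (res, actual :: rest) => (res ++ [actual], rest ++ [actual ++ "0", actual ++ "1"])

def generar_numeros_binarios (n : Int) : List String :=
  if n ≤ 0 then []
  else ((PySem.List.pyRange 0 n 1).foldl (fun st _ => genBinStepA st) ([], ["1"])).1

-- ===== PORT B =====
-- port of Python's bin(m)[2:] for m ≥ 1 (binStr 0 = "0" is never used by the port below)
def binStr (m : Nat) : String :=
  if m < 2 then (if m = 1 then "1" else "0")
  else binStr (m / 2) ++ (if m % 2 = 1 then "1" else "0")
decreasing_by exact Nat.div_lt_self (by omega) (by omega)

def generar_numeros_binarios_alt (n : Int) : List String :=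
  (PySem.List.pyRange 1 (n + 1) 1).map (fun i => binStr i.toNat)

-- ===== PRECONDITION & SPEC =====
def Spec_generar_numeros_binarios (n : Int) (out : List String) : Prop := out = generar_numeros_binarios_alt n
instance (n : Int) (out : List String) : Decidable (Spec_generar_numeros_binarios n out) := by unfold Spec_generar_numeros_binarios; infer_instance

-- ===== CLAIM (what is proved, stated in full; the proofs are below) =====
def Claim_equal_generar_numeros_binarios : Prop := ∀ (n : Int), Dom_generar_numeros_binarios n → Spec_generar_numeros_binarios n (generar_numeros_binarios n)

-- ===== LEMMAS AND PROOFS =====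

theorem binStr_two_mul (m : Nat) (hm : 1 ≤ m) : binStr (2 * m) = binStr m ++ "0" := by
  rw [binStr]
  have h1 : ¬ (2 * m < 2) := by omega
  have h2 : 2 * m / 2 = m := by omega
  have h3 : 2 * m % 2 = 0 := by omega
  simp [h1, h2, h3]

theorem binStr_two_mul_add_one (m : Nat) (hm : 1 ≤ m) :
    binStr (2 * m + 1) = binStr m ++ "1" := by
  rw [binStr]
  have h1 : ¬ (2 * m + 1 < 2) := by omega
  have h2 : (2 * m + 1) / 2 = m := by omega
  have h3 : (2 * m + 1) % 2 = 1 := by omega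
  simp [h1, h2, h3]

-- the results/queue state of A after k iterations
theorem binStr_one : binStr 1 = "1" := by rw [binStr]; norm_num

def resList (k : Nat) : List String := (List.range k).map (fun j => binStr (j + 1))
def colaList (k : Nat) : List String := (List.range (k + 1)).map (fun j => binStr (k + 1 + j))

theorem foldl_const_iterate {α β : Type} (f : α → α) (l : List β) (s : α) :
    l.foldl (fun st _ => f st) s = f^[l.length] s := by
  induction l generalizing s with
  | nil => rfl
  | cons x xs ih => simp [List.foldl_cons, ih, Function.iterate_succ_apply]

theorem genBinStepA_iterate (k : Nat) :
    genBinStepA^[k] ([], ["1"]) = (resList k, colaList k) := by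
  induction k with
  | zero =>
    show ([], ["1"]) = (resList 0, colaList 0)
    unfold resList colaList
    simp [binStr_one]
  | succ k ih =>
    rw [Function.iterate_succ_apply', ih]
    have hcola : colaList k
        = binStr (k + 1) :: (List.range k).map (fun j => binStr (k + 2 + j)) := by
      unfold colaList
      rw [List.range_succ_eq_map]
      simp only [List.map_cons, List.map_map]
      congr 1
      apply List.map_congr_left; intro j _
      simp only [Function.comp_apply]; congr 1; omega
    rw [hcola]
    show (resList k ++ [binStr (k + 1)],
        (List.range k).map (fun j => binStr (k + 2 + j))
          ++ [binStr (k + 1) ++ "0", binStr (k + 1) ++ "1"])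
      = (resList (k + 1), colaList (k + 1))
    have hres : resList (k + 1) = resList k ++ [binStr (k + 1)] := by
      unfold resList; rw [List.range_succ, List.map_append]; simp
    have hcola' : colaList (k + 1)
        = (List.range k).map (fun j => binStr (k + 2 + j))
          ++ [binStr (k + 1) ++ "0", binStr (k + 1) ++ "1"] := by
      unfold colaList
      have hr : List.range (k + 1 + 1) = List.range k ++ [k, k + 1] := by
        rw [List.range_succ, List.range_succ]; simp
      rw [hr, List.map_append]
      have hmap : (List.range k).map (fun j => binStr (k + 1 + 1 + j))
          = (List.range k).map (fun j => binStr (k + 2 + j)) := by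
        apply List.map_congr_left; intro j _
        have h : k + 1 + 1 + j = k + 2 + j := by omega
        rw [h]
      rw [hmap]
      congr 1
      have e0 : k + 1 + 1 + k = 2 * (k + 1) := by omega
      have e1 : k + 1 + 1 + (k + 1) = 2 * (k + 1) + 1 := by omega
      simp only [List.map_cons, List.map_nil, e0, e1]
      rw [binStr_two_mul (k + 1) (by omega), binStr_two_mul_add_one (k + 1) (by omega)]
    rw [hres, hcola']

theorem generar_numeros_binarios_eq (n : Int) :
    generar_numeros_binarios n = generar_numeros_binarios_alt n := by
  unfold generar_numeros_binarios generar_numeros_binarios_alt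
  by_cases hn : n ≤ 0
  · simp [hn]
  · simp only [hn, if_false]
    rw [foldl_const_iterate, PySem.List.length_pyRange_one]
    have h0 : (n - 0).toNat = n.toNat := by omega
    rw [h0, genBinStepA_iterate]
    unfold resList
    rw [PySem.List.pyRange_one]
    have h1 : (n + 1 - 1).toNat = n.toNat := by omega
    rw [h1, List.map_map]
    apply List.map_congr_left
    intro j hj
    simp only [Function.comp]
    congr 1
    omega

-- ===== VERDICT (by name: the statement is the Claim_ definition above) =====
theorem generar_numeros_binarios_spec : Claim_equal_generar_numeros_binarios := by
  intro n _
  unfold Spec_generar_numeros_binarios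
  exact generar_numeros_binarios_eq n
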